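-- pv_equiv track=rewrite | github.com/ref020/ClassCodes | CSC131/02 SignifigantDigits.py | findMostSigDig
-- ===== SOURCE A (Python) =====
-- def findMostSigDig(list):
--     mostSigDigList = [0, 0, 0, 0, 0, 0, 0, 0, 0, 0]
--     for i in range (len(list)):
--         n = list[i]
--         while n >= 10:
--             n = n // 10
--         mostSigDigList[n] += 1
--     return mostSigDigList
-- ===== SOURCE B (Python) =====
-- _POWERS = (1000000000, 100000000, 10000000, 1000000, 100000,
--            10000, 1000, 100, 10)
--
-- def _msd(n):
--     for p in _POWERS:
--         if n >= p:
--             return n // p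
--     return n
--
-- def findMostSigDig(list):
--     tally = [0] * 10
--     for n in list:
--         tally[_msd(n)] += 1
--     return tally
-- ===== Notes on version B (the rewrite author's own statement) =====
-- stated objective: alternative
-- what changed: Replaces A's per-element repeated-division while-loop with a fixed descending table of powers of ten: scan for the first power not exceeding n and do a single division; the tally itself stays a 10-slot list.
import Mathlib
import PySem

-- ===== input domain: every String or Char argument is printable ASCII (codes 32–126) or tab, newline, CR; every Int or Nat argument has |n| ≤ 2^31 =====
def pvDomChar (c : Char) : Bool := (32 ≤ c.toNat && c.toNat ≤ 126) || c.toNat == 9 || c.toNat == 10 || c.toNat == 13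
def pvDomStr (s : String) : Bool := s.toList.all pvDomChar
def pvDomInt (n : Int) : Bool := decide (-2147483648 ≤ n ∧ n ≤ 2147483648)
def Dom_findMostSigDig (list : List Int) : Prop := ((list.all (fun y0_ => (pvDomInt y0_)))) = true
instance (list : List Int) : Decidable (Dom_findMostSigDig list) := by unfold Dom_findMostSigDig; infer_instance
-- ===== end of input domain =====

-- B replaces A's per-element repeated-division while-loop by a fixed table of powers of ten
-- (one comparison scan + a single division); objective: alternative algorithm, same cost class.
-- Pre_ excludes lists with an element ≤ -11, on which both Pythons raise IndexError.

-- ===== PORT A =====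
-- Python: `mostSigDigList[n] += 1` (Python negative indices wrap; in-range inside Pre_)
def pvBump (t : List Int) (idx : Int) : List Int :=
  let j := if idx < 0 then idx + (t.length : Int) else idx
  t.set j.toNat (t.getD j.toNat 0 + 1)

-- Python: `while n >= 10: n = n // 10`
def pvMsdLoop (n : Int) : Int :=
  if _h : 10 ≤ n then pvMsdLoop (PySem.Int.floordiv n 10) else n
termination_by n.toNat
decreasing_by
  rw [PySem.Int.floordiv_eq_ediv_of_pos (by norm_num)]
  omega

def findMostSigDig (list : List Int) : List Int :=
  (PySem.List.pyRange 0 (PySem.List.len list)).foldl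
    (fun t i => pvBump t (pvMsdLoop (PySem.List.pyGetD list i 0)))
    [0, 0, 0, 0, 0, 0, 0, 0, 0, 0]

-- ===== PORT B =====
def pvPowers : List Int :=
  [1000000000, 100000000, 10000000, 1000000, 100000, 10000, 1000, 100, 10]

-- Python: the `for p in _POWERS: if n >= p: return n // p` scan, falling through to n
def pvMsdScan : List Int → Int → Int
  | [], n => n
  | p :: ps, n => if p ≤ n then PySem.Int.floordiv n p else pvMsdScan ps n

def findMostSigDig_alt (list : List Int) : List Int :=
  list.foldl (fun t n => pvBump t (pvMsdScan pvPowers n)) (List.replicate 10 0)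

-- ===== PRECONDITION & SPEC =====
-- Pre_ excludes exactly the inputs on which A raises IndexError: an element ≤ -11
-- reaches `mostSigDigList[n]` with an out-of-range negative index.
def Pre_findMostSigDig (list : List Int) : Prop := ∀ n ∈ list, -10 ≤ n
instance (list : List Int) : Decidable (Pre_findMostSigDig list) := by unfold Pre_findMostSigDig; infer_instance

def pvWitness_findMostSigDig : List Int := [-10, -1, 0, 7, 10, 99, 2147483648]

def Spec_findMostSigDig (list : List Int) (out : List Int) : Prop := out = findMostSigDig_alt list
instance (list : List Int) (out : List Int) : Decidable (Spec_findMostSigDig list out) := by unfold Spec_findMostSigDig; infer_instance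

-- ===== CLAIM (what is proved, stated in full; the proofs are below) =====
def Claim_equal_findMostSigDig : Prop := ∀ (list : List Int), Dom_findMostSigDig list → Pre_findMostSigDig list → Spec_findMostSigDig list (findMostSigDig list)

-- ===== LEMMAS AND PROOFS =====

-- A's while-loop on a bracketed input is a single division by the bracketing power of ten.
theorem pvMsdLoop_bracket (k : Nat) : ∀ n : Int, (10:Int)^k ≤ n → n < 10^(k+1) →
    pvMsdLoop n = PySem.Int.floordiv n ((10:Int)^k) := by
  induction k with
  | zero =>
    intro n h1 h2
    unfold pvMsdLoop
    rw [dif_neg (by omega)]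
    rw [PySem.Int.floordiv_eq_ediv_of_pos (by norm_num)]
    omega
  | succ k ih =>
    intro n h1 h2
    unfold pvMsdLoop
    have hk : (0:Int) < 10^k := by positivity
    have e1 : (10:Int)^(k+1) = 10^k * 10 := by ring
    have e2 : (10:Int)^(k+1+1) = 10^k * 10 * 10 := by ring
    rw [dif_pos (by omega)]
    rw [PySem.Int.floordiv_eq_ediv_of_pos (by norm_num)]
    rw [ih (n / 10) (by omega) (by omega)]
    rw [PySem.Int.floordiv_eq_ediv_of_pos (by positivity),
        PySem.Int.floordiv_eq_ediv_of_pos (by positivity)]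
    rw [Int.ediv_ediv_of_nonneg (by norm_num : (0:Int) ≤ 10)]
    ring_nf

-- per-element agreement of the two most-significant-digit computations on the domain
theorem pvMsd_agree (n : Int) (hd : n ≤ 2147483648) :
    pvMsdLoop n = pvMsdScan pvPowers n := by
  unfold pvMsdScan pvPowers
  simp only [pvMsdScan]
  split_ifs with h1 h2 h3 h4 h5 h6 h7 h8 h9
  · exact pvMsdLoop_bracket 9 n (by norm_num; omega) (by norm_num; omega)
  · exact pvMsdLoop_bracket 8 n (by norm_num; omega) (by norm_num; omega)
  · exact pvMsdLoop_bracket 7 n (by norm_num; omega) (by norm_num; omega)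
  · exact pvMsdLoop_bracket 6 n (by norm_num; omega) (by norm_num; omega)
  · exact pvMsdLoop_bracket 5 n (by norm_num; omega) (by norm_num; omega)
  · exact pvMsdLoop_bracket 4 n (by norm_num; omega) (by norm_num; omega)
  · exact pvMsdLoop_bracket 3 n (by norm_num; omega) (by norm_num; omega)
  · exact pvMsdLoop_bracket 2 n (by norm_num; omega) (by norm_num; omega)
  · exact pvMsdLoop_bracket 1 n (by norm_num; omega) (by norm_num; omega)
  · unfold pvMsdLoop; rw [dif_neg (by omega)]

-- ===== VERDICT (by name: the statement is the Claim_ definition above) =====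
theorem findMostSigDig_spec : Claim_equal_findMostSigDig := by
  intro list hdom _hpre
  unfold Spec_findMostSigDig findMostSigDig findMostSigDig_alt
  rw [show (PySem.List.pyRange 0 (PySem.List.len list)) = PySem.List.pyRange 0 (PySem.List.len list) 1 from rfl]
  rw [PySem.List.foldl_pyRange_pyGetD list 0
        (fun t n => pvBump t (pvMsdLoop n)) _ (le_refl 0)]
  simp only [Int.toNat_zero, List.drop_zero]
  rw [show ([0,0,0,0,0,0,0,0,0,0] : List Int) = List.replicate 10 0 from rfl]
  apply PySem.List.foldl_congr_mem
  intro acc x hx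
  have : pvDomInt x = true := by
    unfold Dom_findMostSigDig at hdom
    exact List.all_eq_true.mp hdom x hx
  unfold pvDomInt at this
  rw [pvMsd_agree x (by simpa using (of_decide_eq_true this).2)]
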